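-- pv_equiv track=rewrite | github.com/981377660LMT/algorithm-study | 17_模式匹配/后缀数组/arc44-d-从后缀数组还原字典序最小的字符串.py | solve
-- ===== SOURCE A (Python) =====
-- from typing import List, Optional
--
-- def solve(sa: List[int]) -> Optional[str]:
--     n = len(sa)
--     rank = [0] * (n + 1)
--     for i, v in enumerate(sa):
--         rank[v] = i + 1
--
--     sb = [ord("A")] * (n + 1)
--     pre = sa[0] + 1
--     for c in sa[1:]:
--         c += 1
--         w = sb[pre]
--         x = rank[pre]
--         y = rank[c]
--         if x > y:
--             w += 1
--         sb[c] = w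
--         pre = c
--
--     if max(sb) > ord("Z"):
--         return None
--     return "".join(map(chr, sb[1:]))
-- ===== SOURCE B (Python) =====
-- from typing import List, Optional
--
-- def solve(sa: List[int]) -> Optional[str]:
--     n = len(sa)
--     rank = [0] * (n + 1)
--     for i, v in enumerate(sa):
--         rank[v] = i + 1
--
--     # partition the suffix-array order into maximal runs on which the string is
--     # constant: a run continues while the successor ranks do not descend
--     groups: List[List[int]] = []
--     for v in sa:
--         if groups and rank[groups[-1][-1] + 1] <= rank[v + 1]:
--             groups[-1].append(v)
--         else:
--             groups.append([v])
--
--     # run g gets the g-th letter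
--     sb = [ord("A")] * (n + 1)
--     for g, run in enumerate(groups):
--         for v in run:
--             sb[v + 1] = ord("A") + g
--     if max(sb) > ord("Z"):
--         return None
--     return "".join(map(chr, sb[1:]))
-- ===== Notes on version B (the rewrite author's own statement) =====
-- stated objective: alternative
-- what changed: A's single stateful scan that carries a running letter and reads back the array it is writing is replaced by a partition-based algorithm: first split the suffix-array order into maximal runs on which the successor ranks do not descend (a list-of-runs data structure), then label every position of run g with the g-th letter in a separate nested pass.
-- outside the precondition, e.g. on solve([1]): A returns 'A', B raises IndexError
import Mathlib
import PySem

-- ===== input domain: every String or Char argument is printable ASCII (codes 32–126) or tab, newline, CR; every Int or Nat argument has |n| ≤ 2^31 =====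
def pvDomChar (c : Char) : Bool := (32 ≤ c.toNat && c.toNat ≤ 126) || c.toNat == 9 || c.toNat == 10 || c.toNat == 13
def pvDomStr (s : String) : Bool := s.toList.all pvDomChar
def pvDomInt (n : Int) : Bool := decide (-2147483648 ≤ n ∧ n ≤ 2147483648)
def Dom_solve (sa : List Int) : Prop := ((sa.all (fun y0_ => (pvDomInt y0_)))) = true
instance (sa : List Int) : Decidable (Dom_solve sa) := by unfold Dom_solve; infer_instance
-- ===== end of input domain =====

-- B replaces A's stateful scan (running letter, reading back the array it writes) by a
-- partition algorithm: split the suffix-array order into maximal non-descending runs of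
-- successor ranks, then label each run with its index letter (objective: alternative).

-- ===== PORT A =====
-- shared helper: the rank-building loop `for i, v in enumerate(sa): rank[v] = i + 1`
-- (verbatim the same loop in Source A and Source B)
def pvRank (sa : List Int) : List Int :=
  (PySem.List.enumerate sa).foldl
    (fun r iv => PySem.List.pySetD r iv.2 (iv.1 + 1))
    (List.replicate (sa.length + 1) (0 : Int))

def solve (sa : List Int) : Option String :=
  let n := sa.length
  let rank := pvRank sa
  let sb0 : List Int := List.replicate (n + 1) (65 : Int)      -- [ord("A")] * (n+1)
  let pre0 : Int := PySem.List.pyGetD sa 0 0 + 1               -- sa[0] + 1 (Pre_ excludes [])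
  let st :=
    (PySem.List.slice sa (some 1) none).foldl                  -- for c in sa[1:]
      (fun (st : Int × List Int) v =>
        let c := v + 1
        let w := PySem.List.pyGetD st.2 st.1 0                 -- w = sb[pre]
        let x := PySem.List.pyGetD rank st.1 0                 -- x = rank[pre]
        let y := PySem.List.pyGetD rank c 0                    -- y = rank[c]
        let w := if x > y then w + 1 else w
        (c, PySem.List.pySetD st.2 c w))                       -- sb[c] = w; pre = c
      (pre0, sb0)
  let sb := st.2
  if 90 < PySem.List.maxD sb (fun z => z) 0 then none          -- max(sb) > ord("Z")  (sb nonempty)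
  else some (String.ofList ((PySem.List.slice sb (some 1) none).map (fun v => Char.ofNat v.toNat)))

-- ===== PORT B =====
def solve_alt (sa : List Int) : Option String :=
  let n := sa.length
  let rank := pvRank sa
  let groups :=                                                 -- for v in sa: extend the last run or start a new one
    sa.foldl
      (fun (gs : List (List Int)) v =>
        if gs ≠ [] ∧ PySem.List.pyGetD rank
              (PySem.List.pyGetD (PySem.List.pyGetD gs (-1) []) (-1) 0 + 1) 0
            ≤ PySem.List.pyGetD rank (v + 1) 0
        then PySem.List.pySetD gs (-1) (PySem.List.pyGetD gs (-1) [] ++ [v])   -- groups[-1].append(v)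
        else gs ++ [[v]])                                       -- groups.append([v])
      []
  let sb :=                                                     -- for g, run in enumerate(groups): for v in run: sb[v+1] = ord("A") + g
    (PySem.List.enumerate groups).foldl
      (fun r grun => grun.2.foldl (fun r v => PySem.List.pySetD r (v + 1) (65 + grun.1)) r)
      (List.replicate (n + 1) (65 : Int))
  if 90 < PySem.List.maxD sb (fun z => z) 0 then none
  else some (String.ofList ((PySem.List.slice sb (some 1) none).map (fun v => Char.ofNat v.toNat)))

-- ===== PRECONDITION & SPEC =====
-- Pre_ excludes the empty list (A raises IndexError at sa[0]) and entries outside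
-- [-(n+1), n-1]: outside that range one of the programs hits an out-of-range index
-- (IndexError) — in particular the degenerate singleton [1], where A returns "A" only
-- because its loop never runs, while B's labelling write raises IndexError.
def Pre_solve (sa : List Int) : Prop :=
  sa ≠ [] ∧ ∀ v ∈ sa, -((sa.length : Int) + 1) ≤ v ∧ v ≤ (sa.length : Int) - 1
instance (sa : List Int) : Decidable (Pre_solve sa) := by unfold Pre_solve; infer_instance

def pvWitness_solve : List Int := [1, 0, 2]

def Spec_solve (sa : List Int) (out : Option String) : Prop := out = solve_alt sa
instance (sa : List Int) (out : Option String) : Decidable (Spec_solve sa out) := by unfold Spec_solve; infer_instance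

-- ===== CLAIM (what is proved, stated in full; the proofs are below) =====
def Claim_equal_solve : Prop := ∀ (sa : List Int), Dom_solve sa → Pre_solve sa → Spec_solve sa (solve sa)

-- ===== LEMMAS AND PROOFS =====

-- running sums, only used to STATE the common intermediate form of the two loops
def pvAccum (acc : Int) : List Int → List Int
  | [] => []
  | x :: xs => (acc + x) :: pvAccum (acc + x) xs

-- label pairs of a list of runs: every element of the k-th run paired with k
def pvLP (k : Int) : List (List Int) → List (Int × Int)
  | [] => []
  | g :: gss => g.map (fun v => (v, k)) ++ pvLP (k + 1) gss

-- reading back the slot just written (index possibly negative, in range)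
theorem pv_getD_setD_self (xs : List Int) (i : Int) (v d : Int)
    (h : PySem.Raise.InRange xs.length i) :
    PySem.List.pyGetD (PySem.List.pySetD xs i v) i d = v := by
  obtain ⟨h1, h2⟩ := h
  unfold PySem.List.pyGetD PySem.List.pyGet? PySem.List.pySetD PySem.List.pySet? PySem.List.pyIdx?
  by_cases h0 : 0 ≤ i
  · simp [h0, h2, show i.toNat < xs.length by omega]
  · simp [h0, h1, show xs.length - (-i).toNat < xs.length by omega]

theorem pv_getD_replicate (n : Nat) (i : Int) (c d : Int)
    (h : PySem.Raise.InRange n i) :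
    PySem.List.pyGetD (List.replicate n c) i d = c := by
  obtain ⟨h1, h2⟩ := h
  unfold PySem.List.pyGetD PySem.List.pyGet? PySem.List.pyIdx?
  by_cases h0 : 0 ≤ i
  · simp [h0, h2, show i.toNat < n by omega]
  · simp [h0, h1, show n - (-i).toNat < n by omega]

-- writing the value a replicate already holds changes nothing (any index)
theorem pv_setD_replicate_self (n : Nat) (i : Int) (c : Int) :
    PySem.List.pySetD (List.replicate n c) i c = List.replicate n c := by
  unfold PySem.List.pySetD PySem.List.pySet? PySem.List.pyIdx?
  repeat' split
  all_goals simp [List.set_replicate_self]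

-- `lst[-1] = x` on a list ending with a known last element
theorem pv_setD_neg_one_append_singleton (xs : List (List Int)) (x v : List Int) :
    PySem.List.pySetD (xs ++ [x]) (-1) v = xs ++ [v] := by
  unfold PySem.List.pySetD PySem.List.pySet? PySem.List.pyIdx?
  simp [List.set_append_right _ _ (Nat.le_refl _)]

-- A's loop over t (state: previous written index a+1, array sb) produces the same array
-- as the scatter of t zipped with the accumulated classes.
theorem pv_loop_eq (r : List Int) (t : List Int) :
    ∀ (sb : List Int) (a acc : Int),
    (t ≠ [] → PySem.List.pyGetD sb (a + 1) 0 = 65 + acc) →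
    (∀ v ∈ t, PySem.Raise.InRange sb.length (v + 1)) →
    (t.foldl
      (fun (st : Int × List Int) v =>
        let c := v + 1
        let w := PySem.List.pyGetD st.2 st.1 0
        let x := PySem.List.pyGetD r st.1 0
        let y := PySem.List.pyGetD r c 0
        let w := if x > y then w + 1 else w
        (c, PySem.List.pySetD st.2 c w)) (a + 1, sb)).2
    = (t.zip (pvAccum acc
        (((a :: t).zip t).map
          (fun pc => if PySem.List.pyGetD r (pc.1 + 1) 0 > PySem.List.pyGetD r (pc.2 + 1) 0
                     then (1 : Int) else 0)))).foldl
        (fun sbb vc => PySem.List.pySetD sbb (vc.1 + 1) (65 + vc.2)) sb := by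
  induction t with
  | nil => intro sb a acc _ _; rfl
  | cons v vs ih =>
    intro sb a acc hget hrange
    have hw : PySem.List.pyGetD sb (a + 1) 0 = 65 + acc := hget (by simp)
    have hin : PySem.Raise.InRange sb.length (v + 1) := hrange v (by simp)
    simp only [List.zip_cons_cons, List.map_cons, pvAccum, List.foldl_cons]
    set i : Int := if PySem.List.pyGetD r (a + 1) 0 > PySem.List.pyGetD r (v + 1) 0
                   then (1 : Int) else 0 with hi
    have hwval : (if PySem.List.pyGetD r (a + 1) 0 > PySem.List.pyGetD r (v + 1) 0
                  then PySem.List.pyGetD sb (a + 1) 0 + 1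
                  else PySem.List.pyGetD sb (a + 1) 0) = 65 + (acc + i) := by
      rw [hi, hw]; split_ifs <;> ring
    simp only [hwval]
    exact ih (PySem.List.pySetD sb (v + 1) (65 + (acc + i))) v (acc + i)
      (fun _ => pv_getD_setD_self sb (v + 1) _ 0 hin)
      (fun u hu => by
        rw [PySem.List.length_pySetD]
        exact hrange u (by simp [hu]))

-- label pairs of runs with one run appended at the end
theorem pv_LP_append_singleton (k : Int) (gs : List (List Int)) (run : List Int) :
    pvLP k (gs ++ [run]) = pvLP k gs ++ run.map (fun v => (v, k + gs.length)) := by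
  induction gs generalizing k with
  | nil => simp [pvLP]
  | cons g gss ih =>
    simp only [List.cons_append, pvLP, ih (k + 1), List.append_assoc, List.length_cons,
      Nat.cast_add, Nat.cast_one]
    have h : k + 1 + (gss.length : Int) = k + ((gss.length : Int) + 1) := by ring
    rw [h]

-- B's nested labelling loop is the scatter of the label pairs of the runs
theorem pv_nested_eq_LP (gss : List (List Int)) :
    ∀ (s : Int) (r0 : List Int),
    (PySem.List.enumerate gss s).foldl
      (fun r grun => grun.2.foldl (fun r v => PySem.List.pySetD r (v + 1) (65 + grun.1)) r) r0
    = (pvLP s gss).foldl (fun r vc => PySem.List.pySetD r (vc.1 + 1) (65 + vc.2)) r0 := by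
  induction gss with
  | nil => intro s r0; rfl
  | cons g gss ih =>
    intro s r0
    rw [PySem.List.enumerate_cons, List.foldl_cons]
    simp only [pvLP, List.foldl_append, List.foldl_map]
    exact ih (s + 1) _

-- B's grouping loop: folding the tail t into a nonempty run list whose last run ends in
-- prev appends exactly the label pairs (t zipped with the accumulated classes).
theorem pv_groups_eq (r : List Int) (t : List Int) :
    ∀ (gs : List (List Int)) (run : List Int) (prev : Int),
    run.getLast? = some prev →
    pvLP 0 (t.foldl
      (fun (gs : List (List Int)) v =>
        if gs ≠ [] ∧ PySem.List.pyGetD r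
              (PySem.List.pyGetD (PySem.List.pyGetD gs (-1) []) (-1) 0 + 1) 0
            ≤ PySem.List.pyGetD r (v + 1) 0
        then PySem.List.pySetD gs (-1) (PySem.List.pyGetD gs (-1) [] ++ [v])
        else gs ++ [[v]]) (gs ++ [run]))
    = pvLP 0 (gs ++ [run]) ++ t.zip (pvAccum (gs.length : Int)
        (((prev :: t).zip t).map
          (fun pc => if PySem.List.pyGetD r (pc.1 + 1) 0 > PySem.List.pyGetD r (pc.2 + 1) 0
                     then (1 : Int) else 0))) := by
  induction t with
  | nil => intro gs run prev _; simp
  | cons v vs ih =>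
    intro gs run prev hlast
    have hne : run ≠ [] := by
      intro h; rw [h] at hlast; simp at hlast
    have hgetrun : PySem.List.pyGetD (gs ++ [run]) (-1) ([] : List Int) = run :=
      PySem.List.pyGetD_neg_one_append_singleton gs run []
    have hgetprev : PySem.List.pyGetD run (-1) (0 : Int) = prev := by
      rw [PySem.List.pyGetD_neg_one run 0 hne, List.getLast_eq_iff_getLast?_eq_some]
      exact hlast
    simp only [List.foldl_cons, List.zip_cons_cons, List.map_cons, pvAccum, hgetrun, hgetprev]
    by_cases hle : PySem.List.pyGetD r (prev + 1) 0 ≤ PySem.List.pyGetD r (v + 1) 0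
    · rw [if_pos ⟨by simp, hle⟩, if_neg (not_lt.mpr hle),
        pv_setD_neg_one_append_singleton,
        ih gs (run ++ [v]) v (by simp),
        pv_LP_append_singleton, pv_LP_append_singleton]
      simp [add_zero]
    · rw [if_neg (by rintro ⟨-, h⟩; exact hle h), if_pos (not_le.mp hle),
        show gs ++ [run] ++ [[v]] = (gs ++ [run]) ++ [[v]] by simp,
        ih (gs ++ [run]) [v] v rfl,
        pv_LP_append_singleton]
      simp only [List.map_cons, List.map_nil, List.length_append, List.length_cons,
        List.length_nil, List.append_assoc]
      push_cast
      ring_nf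
      simp

-- ===== VERDICT (by name: the statement is the Claim_ definition above) =====
theorem solve_spec : Claim_equal_solve := by
  intro sa _ hpre
  obtain ⟨hne, hbound⟩ := hpre
  unfold Spec_solve solve solve_alt
  obtain ⟨a, t, rfl⟩ : ∃ a t, sa = a :: t := by
    cases sa with
    | nil => exact absurd rfl hne
    | cons a t => exact ⟨a, t, rfl⟩
  simp only [PySem.List.slice_from_one, List.tail_cons]
  have hget0 : PySem.List.pyGetD (a :: t) 0 0 = a := PySem.List.pyGetD_zero_cons a t 0
  rw [hget0]
  have hlen : (a :: t).length = t.length + 1 := by simp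
  -- A's array equals the scatter of the tail's label pairs over the fresh array
  have hA := pv_loop_eq (pvRank (a :: t)) t
      (List.replicate ((a :: t).length + 1) (65 : Int)) a 0
      (fun _ => by
        have hb := hbound a (by simp)
        rw [pv_getD_replicate _ _ _ _ ⟨by push_cast; omega, by push_cast; omega⟩]
        ring)
      (fun v hv => by
        have hb := hbound v (by simp [hv])
        rw [List.length_replicate]
        exact ⟨by push_cast; omega, by push_cast; omega⟩)
  -- B's grouping loop: the first iteration starts the run list at [[a]]
  have hfirst :
      (a :: t).foldl
        (fun (gs : List (List Int)) v =>
          if gs ≠ [] ∧ PySem.List.pyGetD (pvRank (a :: t))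
                (PySem.List.pyGetD (PySem.List.pyGetD gs (-1) []) (-1) 0 + 1) 0
              ≤ PySem.List.pyGetD (pvRank (a :: t)) (v + 1) 0
          then PySem.List.pySetD gs (-1) (PySem.List.pyGetD gs (-1) [] ++ [v])
          else gs ++ [[v]]) []
      = t.foldl
        (fun (gs : List (List Int)) v =>
          if gs ≠ [] ∧ PySem.List.pyGetD (pvRank (a :: t))
                (PySem.List.pyGetD (PySem.List.pyGetD gs (-1) []) (-1) 0 + 1) 0
              ≤ PySem.List.pyGetD (pvRank (a :: t)) (v + 1) 0
          then PySem.List.pySetD gs (-1) (PySem.List.pyGetD gs (-1) [] ++ [v])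
          else gs ++ [[v]]) ([] ++ [[a]]) := by
    rw [List.foldl_cons, if_neg (by rintro ⟨h, -⟩; exact h rfl)]
  have hB := pv_groups_eq (pvRank (a :: t)) t [] [a] a rfl
  rw [hfirst, pv_nested_eq_LP, hB]
  simp only [List.nil_append, pvLP, List.map_nil, List.map_cons, List.length_nil,
    Nat.cast_zero, List.append_nil, List.singleton_append, List.foldl_cons]
  rw [show (65 : Int) + 0 = 65 by ring, pv_setD_replicate_self]
  rw [hA]
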